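-- pv_equiv track=rewrite | github.com/Vionian/moetide | mod_builder.py | _validate_languages
-- ===== SOURCE A (Python) =====
-- from typing import Iterable
--
-- LANG_LABEL = {
--     "ja": "日语",
--     "chs": "汉语",
--     "en": "英语",
-- }
--
-- LANG_ORDER = ["ja", "chs", "en"]
--
-- class BuilderError(RuntimeError):
--     pass
--
-- def _validate_languages(langs: Iterable[str]) -> list[str]:
--     got = []
--     for lang in langs:
--         lang = lang.lower().strip()
--         if lang not in LANG_LABEL:
--             raise BuilderError(f"不支持的语言: {lang}，只支持 ja/chs/en。")
--         if lang not in got: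
--             got.append(lang)
--     if not got:
--         raise BuilderError("至少需要选择一种语言（ja/chs/en）。")
--     return sorted(got, key=LANG_ORDER.index)
-- ===== SOURCE B (Python) =====
-- LANG_LABEL = {
--     "ja": "日语",
--     "chs": "汉语",
--     "en": "英语",
-- }
--
-- LANG_ORDER = ["ja", "chs", "en"]
--
-- _BIT = {"ja": 1, "chs": 2, "en": 4}
--
-- class BuilderError(RuntimeError):
--     pass
--
-- def _validate_languages(langs):
--     # accumulate the selection as a 3-bit mask instead of a deduped list
--     mask = 0
--     for lang in langs:
--         lang = lang.lower().strip()
--         bit = _BIT.get(lang)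
--         if bit is None:
--             raise BuilderError(f"不支持的语言: {lang}，只支持 ja/chs/en。")
--         mask |= bit
--     if mask == 0:
--         raise BuilderError("至少需要选择一种语言（ja/chs/en）。")
--     return [l for i, l in enumerate(LANG_ORDER) if (mask >> i) & 1]
-- ===== Notes on version B (the rewrite author's own statement) =====
-- stated objective: alternative
-- what changed: the selection is accumulated as a 3-bit integer mask (one bit per supported code, OR-ed in) instead of a deduped list, and the result is decoded from the mask by bit-testing along the canonical order instead of sorting with key=LANG_ORDER.index
import Mathlib
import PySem

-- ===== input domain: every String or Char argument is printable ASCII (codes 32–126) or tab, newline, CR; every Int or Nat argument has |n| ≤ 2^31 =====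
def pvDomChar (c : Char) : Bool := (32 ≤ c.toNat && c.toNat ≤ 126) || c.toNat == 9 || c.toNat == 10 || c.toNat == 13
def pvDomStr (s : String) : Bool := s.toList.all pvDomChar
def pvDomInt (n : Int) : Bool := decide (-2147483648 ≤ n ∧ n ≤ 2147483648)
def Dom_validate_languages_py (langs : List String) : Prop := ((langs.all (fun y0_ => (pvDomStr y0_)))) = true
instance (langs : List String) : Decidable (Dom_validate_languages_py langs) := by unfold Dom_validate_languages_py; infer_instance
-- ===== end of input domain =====

-- B accumulates the selection as a 3-bit integer mask (one bit per supported code) and decodes the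
-- result by bit-testing along the canonical order, instead of deduping into a list and sorting it
-- with key=LANG_ORDER.index (objective: alternative).

-- ===== PORT A =====
def pvLangLabel : PySem.Dict String String :=
  PySem.Dict.ofList [("ja", "日语"), ("chs", "汉语"), ("en", "英语")]

def pvLangOrder : List String := ["ja", "chs", "en"]

-- the validation/dedup loop; 'none' = the BuilderError raise on an unsupported code
def pvALoop : List String → List String → Option (List String)
  | [], got => some got
  | l :: rest, got =>
    let lang := PySem.Str.strip (PySem.Str.lower l)
    if pvLangLabel.contains lang then
      pvALoop rest (if lang ∈ got then got else got ++ [lang])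
    else none

def validate_languages_py (langs : List String) : List String :=
  match pvALoop langs [] with
  | none => []      -- BuilderError (unsupported code): outside Pre_
  | some got =>
    if got = [] then []      -- BuilderError (no language): outside Pre_
    else PySem.List.sorted got (fun x => (PySem.List.index? pvLangOrder x).getD 0) false

-- ===== PORT B =====
def pvBit : PySem.Dict String Int :=
  PySem.Dict.ofList [("ja", 1), ("chs", 2), ("en", 4)]

-- the validation loop accumulating the bitmask; 'none' = the BuilderError raise
def pvBLoop : List String → Int → Option Int
  | [], mask => some mask
  | l :: rest, mask =>
    let lang := PySem.Str.strip (PySem.Str.lower l)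
    match pvBit.get? lang with
    | some bit => pvBLoop rest (PySem.Int.bor mask bit)
    | none => none

def validate_languages_py_alt (langs : List String) : List String :=
  match pvBLoop langs 0 with
  | none => []      -- BuilderError (unsupported code): outside Pre_
  | some mask =>
    if mask = 0 then []      -- BuilderError (no language): outside Pre_
    else (PySem.List.enumerate pvLangOrder).filterMap
      (fun p => if PySem.Int.band (mask >>> p.1.toNat) 1 = 1 then some p.2 else none)
      -- indices from enumerate are 0,1,2 ≥ 0, so .toNat is exact here

-- ===== PRECONDITION & SPEC =====
-- Pre_ excludes exactly the inputs where A raises BuilderError: the empty selection and any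
-- entry whose lowered+stripped form is not one of the supported codes.
def Pre_validate_languages_py (langs : List String) : Prop :=
  langs ≠ [] ∧ ∀ s ∈ langs, PySem.Str.strip (PySem.Str.lower s) ∈ pvLangOrder
instance (langs : List String) : Decidable (Pre_validate_languages_py langs) := by
  unfold Pre_validate_languages_py; infer_instance

def pvWitness_validate_languages_py : List String := ["EN ", "ja", "chs", "Ja"]

def Spec_validate_languages_py (langs : List String) (out : List String) : Prop := out = validate_languages_py_alt langs
instance (langs : List String) (out : List String) : Decidable (Spec_validate_languages_py langs out) := by unfold Spec_validate_languages_py; infer_instance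

-- ===== CLAIM (what is proved, stated in full; the proofs are below) =====
def Claim_equal_validate_languages_py : Prop := ∀ (langs : List String), Dom_validate_languages_py langs → Pre_validate_languages_py langs → Spec_validate_languages_py langs (validate_languages_py langs)

-- ===== LEMMAS AND PROOFS =====

-- the mask encoding of a got-list: one bit per supported code, by membership
def pvMaskOf (g : List String) : Int :=
  PySem.Int.bor (PySem.Int.bor (if "ja" ∈ g then 1 else 0) (if "chs" ∈ g then 2 else 0))
    (if "en" ∈ g then 4 else 0)

theorem mem_order_contains {t : String} (h : t ∈ pvLangOrder) :
    pvLangLabel.contains t = true := by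
  simp only [pvLangOrder, List.mem_cons, List.not_mem_nil, or_false] at h
  rcases h with h | h | h <;> subst h <;> decide

theorem not_mem_order_lookups {t : String} (h : t ∉ pvLangOrder) :
    pvLangLabel.contains t = false ∧ pvBit.get? t = none := by
  simp only [pvLangOrder, List.mem_cons, List.not_mem_nil, or_false, not_or] at h
  obtain ⟨h1, h2, h3⟩ := h
  have h1' : ¬ "ja" = t := fun e => h1 e.symm
  have h2' : ¬ "chs" = t := fun e => h2 e.symm
  have h3' : ¬ "en" = t := fun e => h3 e.symm
  constructor
  · rw [show pvLangLabel = PySem.Dict.mk [("ja", "日语"), ("chs", "汉语"), ("en", "英语")] from rfl]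
    simp [PySem.Dict.contains_mk, h1', h2', h3']
  · rw [show pvBit = PySem.Dict.mk [("ja", 1), ("chs", 2), ("en", 4)] from rfl]
    simp [PySem.Dict.get?_mk_cons, h1', h2', h3']
    rfl

-- one step of the accumulators agrees through the mask encoding
theorem maskOf_step {t : String} (ht : t ∈ pvLangOrder) (got : List String) (bit : Int)
    (hb : pvBit.get? t = some bit) :
    pvMaskOf (if t ∈ got then got else got ++ [t]) = PySem.Int.bor (pvMaskOf got) bit := by
  simp only [pvLangOrder, List.mem_cons, List.not_mem_nil, or_false] at ht
  rcases ht with h | h | h <;> subst h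
  · rw [show pvBit.get? "ja" = some 1 from by decide, Option.some.injEq] at hb
    subst hb
    by_cases hja : "ja" ∈ got <;> by_cases hchs : "chs" ∈ got <;> by_cases hen : "en" ∈ got <;>
      simp [pvMaskOf, hja, hchs, hen] <;> decide
  · rw [show pvBit.get? "chs" = some 2 from by decide, Option.some.injEq] at hb
    subst hb
    by_cases hja : "ja" ∈ got <;> by_cases hchs : "chs" ∈ got <;> by_cases hen : "en" ∈ got <;>
      simp [pvMaskOf, hja, hchs, hen] <;> decide
  · rw [show pvBit.get? "en" = some 4 from by decide, Option.some.injEq] at hb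
    subst hb
    by_cases hja : "ja" ∈ got <;> by_cases hchs : "chs" ∈ got <;> by_cases hen : "en" ∈ got <;>
      simp [pvMaskOf, hja, hchs, hen] <;> decide

-- the B loop is the A loop through the mask encoding
theorem bLoop_eq (langs : List String) (got : List String) :
    pvBLoop langs (pvMaskOf got) = Option.map pvMaskOf (pvALoop langs got) := by
  induction langs generalizing got with
  | nil => rfl
  | cons l rest ih =>
    simp only [pvBLoop, pvALoop]
    set t := PySem.Str.strip (PySem.Str.lower l) with hteq
    by_cases ht : t ∈ pvLangOrder
    · have hc := mem_order_contains ht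
      have hb : ∃ b, pvBit.get? t = some b := by
        simp only [pvLangOrder, List.mem_cons, List.not_mem_nil, or_false] at ht
        rcases ht with h | h | h
        · exact ⟨1, by rw [h]; decide⟩
        · exact ⟨2, by rw [h]; decide⟩
        · exact ⟨4, by rw [h]; decide⟩
      obtain ⟨b, hb⟩ := hb
      rw [hb]
      simp only [hc, if_true]
      rw [← maskOf_step ht got b hb, ih]
    · obtain ⟨hc, hg⟩ := not_mem_order_lookups ht
      rw [hg, hc]
      simp

-- the loop succeeds on valid input and its accumulator stays a nodup sublist of the codes, growing
theorem aLoop_sound (langs : List String) (got : List String)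
    (hv : ∀ s ∈ langs, PySem.Str.strip (PySem.Str.lower s) ∈ pvLangOrder) :
    ∃ g, pvALoop langs got = some g ∧ got ⊆ g ∧
      (got.Nodup → g.Nodup) ∧
      ((∀ x ∈ got, x ∈ pvLangOrder) → ∀ x ∈ g, x ∈ pvLangOrder) := by
  induction langs generalizing got with
  | nil => exact ⟨got, rfl, List.Subset.refl _, fun h => h, fun h => h⟩
  | cons l rest ih =>
    have ht : PySem.Str.strip (PySem.Str.lower l) ∈ pvLangOrder := hv l (by simp)
    have hrest : ∀ s ∈ rest, PySem.Str.strip (PySem.Str.lower s) ∈ pvLangOrder :=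
      fun s hs => hv s (by simp [hs])
    set t := PySem.Str.strip (PySem.Str.lower l) with hteq
    obtain ⟨g, hg, hsub, hnd, hall⟩ := ih (if t ∈ got then got else got ++ [t]) hrest
    refine ⟨g, ?_, ?_, ?_, ?_⟩
    · simp only [pvALoop, ← hteq, mem_order_contains ht, if_true]; exact hg
    · intro x hx
      exact hsub (by by_cases hm : t ∈ got <;> simp [hm, hx])
    · intro hnodup
      apply hnd
      by_cases hm : t ∈ got <;> simp [List.nodup_append, hm, hnodup]
      exact fun a ha h => hm (h ▸ ha)
    · intro hgot
      apply hall
      intro x hx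
      by_cases hm : t ∈ got <;> simp [hm] at hx
      · exact hgot x hx
      · rcases hx with hx | hx
        · exact hgot x hx
        · exact hx ▸ ht

-- decoding the mask of a got-list IS filtering LANG_ORDER by membership
theorem decode_maskOf (g : List String) :
    (PySem.List.enumerate pvLangOrder).filterMap
      (fun p => if PySem.Int.band (pvMaskOf g >>> p.1.toNat) 1 = 1 then some p.2 else none)
      = pvLangOrder.filter (fun l => g.contains l) := by
  by_cases hja : "ja" ∈ g <;> by_cases hchs : "chs" ∈ g <;> by_cases hen : "en" ∈ g <;>
    simp [pvMaskOf, pvLangOrder, hja, hchs, hen, PySem.List.enumerate, List.filterMap,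
      List.filter] <;> decide

-- sorting a nodup subset of the codes by LANG_ORDER.index IS filtering LANG_ORDER by membership
theorem sorted_eq_filter (g : List String) (hnd : g.Nodup)
    (hall : ∀ x ∈ g, x ∈ pvLangOrder) :
    PySem.List.sorted g (fun x => (PySem.List.index? pvLangOrder x).getD 0) false
      = pvLangOrder.filter (fun l => g.contains l) := by
  apply PySem.List.sorted_eq_of_perm_of_pairwise_lt
  · rw [List.perm_ext_iff_of_nodup (List.Nodup.filter _ (by decide)) hnd]
    intro a
    simp only [List.mem_filter, List.contains_iff_mem]
    exact ⟨fun h => h.2, fun h => ⟨hall a h, h⟩⟩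
  · simp only [pvLangOrder, List.filter]
    cases hja : g.contains "ja" <;> cases hchs : g.contains "chs" <;>
      cases hen : g.contains "en" <;> simp <;> decide

-- a nonempty got-list of codes has a nonzero mask
theorem maskOf_ne_zero (g : List String) (hne : g ≠ [])
    (hall : ∀ x ∈ g, x ∈ pvLangOrder) : pvMaskOf g ≠ 0 := by
  have hx : ∃ c, c ∈ g ∧ c ∈ pvLangOrder := by
    cases g with
    | nil => exact absurd rfl hne
    | cons x xs => exact ⟨x, by simp, hall x (by simp)⟩
  obtain ⟨c, hc, hord⟩ := hx
  simp only [pvLangOrder, List.mem_cons, List.not_mem_nil, or_false] at hord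
  rcases hord with h | h | h <;> subst h <;>
    by_cases h1 : "ja" ∈ g <;> by_cases h2 : "chs" ∈ g <;> by_cases h3 : "en" ∈ g <;>
    simp_all [pvMaskOf] <;> decide

-- ===== VERDICT (by name: the statement is the Claim_ definition above) =====
theorem validate_languages_py_spec : Claim_equal_validate_languages_py := by
  intro langs _ hpre
  obtain ⟨hne, hv⟩ := hpre
  unfold Spec_validate_languages_py validate_languages_py validate_languages_py_alt
  have hmask0 : pvMaskOf [] = 0 := by decide
  rw [show (0 : Int) = pvMaskOf [] from rfl, bLoop_eq]
  obtain ⟨g, hg, hsub, hnd, hall⟩ := aLoop_sound langs [] hv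
  have hgne : g ≠ [] := by
    cases langs with
    | nil => exact absurd rfl hne
    | cons l rest =>
      intro hnil
      subst hnil
      -- g = [] but the loop starting from [] on a nonempty valid input puts the head's code in
      have ht : PySem.Str.strip (PySem.Str.lower l) ∈ pvLangOrder := hv l (by simp)
      obtain ⟨g', hg', hsub', _, _⟩ := aLoop_sound rest [PySem.Str.strip (PySem.Str.lower l)]
        (fun s hs => hv s (by simp [hs]))
      have : pvALoop (l :: rest) [] = some g' := by
        simp only [pvALoop, mem_order_contains ht, if_true, List.not_mem_nil, if_false,
          List.nil_append]
        exact hg'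
      rw [this] at hg
      cases hg
      have := hsub' (by simp : PySem.Str.strip (PySem.Str.lower l) ∈ _)
      simp at this
  have hallg : ∀ x ∈ g, x ∈ pvLangOrder := hall (by simp)
  rw [hg]
  simp only [Option.map_some, hmask0]
  rw [if_neg (maskOf_ne_zero g hgne hallg)]
  rw [decode_maskOf, sorted_eq_filter g (hnd List.nodup_nil) hallg, if_neg hgne]
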